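-- pv_equiv track=rewrite | github.com/mtgericke/MOLLER-IntElec-ProtoSoft | PythonSoft/scripts/filter_test/filter_test.py | get_zero_crossings
-- ===== SOURCE A (Python) =====
-- def get_zero_crossings(data):
--
--     n_prev = data[0]
--     for n in range(len(data)):
--         if(data[n]>0 and n_prev<0):
--             first = n
--             break
--         n_prev = data[n]
--
--
--     for n in range(len(data)):
--         if(data[n]>0 and n_prev<0):
--             last = n
--
--         n_prev = data[n]
--
--     return (first, last)
-- ===== SOURCE B (Python) =====
-- def get_zero_crossings(data):
--     xs = [i for i in range(1, len(data)) if data[i] > 0 and data[i - 1] < 0]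
--     return (xs[0], xs[-1])
-- ===== Notes on version B (the rewrite author's own statement) =====
-- stated objective: simpler
-- what changed: Replaces A's two stateful scans (first with break, second carrying n_prev across loops) by one comprehension collecting all crossing indices, returning its first and last element; Pre_ excludes only inputs where A raises (empty data: IndexError; no crossing: UnboundLocalError).
import Mathlib
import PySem

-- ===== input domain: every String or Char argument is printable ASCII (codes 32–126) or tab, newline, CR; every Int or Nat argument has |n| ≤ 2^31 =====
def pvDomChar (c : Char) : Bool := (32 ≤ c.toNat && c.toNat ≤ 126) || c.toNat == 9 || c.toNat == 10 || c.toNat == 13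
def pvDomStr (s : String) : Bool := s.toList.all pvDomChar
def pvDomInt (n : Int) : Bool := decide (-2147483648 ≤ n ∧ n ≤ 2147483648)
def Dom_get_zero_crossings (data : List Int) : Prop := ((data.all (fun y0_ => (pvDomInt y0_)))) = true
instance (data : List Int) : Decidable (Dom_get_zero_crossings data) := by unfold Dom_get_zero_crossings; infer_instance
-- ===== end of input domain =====

-- B replaces A's two stateful scans by a single comprehension over the crossing
-- indices, returning its first and last element (objective: simpler).

-- ===== PORT A =====
-- first loop: for n in range(len(data)) with break; returns (first, n_prev at break)
def pvA_first (data : List Int) : List Int → Int → Option (Int × Int)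
  | [], _ => none
  | n :: rest, n_prev =>
    if PySem.List.pyGetD data n 0 > 0 ∧ n_prev < 0 then some (n, n_prev)
    else pvA_first data rest (PySem.List.pyGetD data n 0)

-- second loop: keeps updating last (none = unbound)
def pvA_second (data : List Int) : List Int → Int → Option Int → Option Int
  | [], _, last => last
  | n :: rest, n_prev, last =>
    pvA_second data rest (PySem.List.pyGetD data n 0)
      (if PySem.List.pyGetD data n 0 > 0 ∧ n_prev < 0 then some n else last)

def get_zero_crossings (data : List Int) : Int × Int :=
  let n_prev := PySem.List.pyGetD data 0 0
  match pvA_first data (PySem.List.pyRange 0 (data.length : Int) 1) n_prev with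
  | none => (0, 0)   -- Python: UnboundLocalError; excluded by Pre_
  | some (first, np) =>
    match pvA_second data (PySem.List.pyRange 0 (data.length : Int) 1) np none with
    | none => (0, 0) -- Python: UnboundLocalError; excluded by Pre_
    | some last => (first, last)

-- ===== PORT B =====
def pvB_p (data : List Int) (i : Int) : Bool :=
  decide (PySem.List.pyGetD data i 0 > 0) && decide (PySem.List.pyGetD data (i - 1) 0 < 0)

def get_zero_crossings_alt (data : List Int) : Int × Int :=
  let xs := (PySem.List.pyRange 1 (data.length : Int) 1).filter (pvB_p data)
  (PySem.List.pyGetD xs 0 0, PySem.List.pyGetD xs (-1) 0)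

-- ===== PRECONDITION & SPEC =====
-- Pre_ excludes exactly the inputs on which A raises: empty data (IndexError on data[0])
-- and data with no sign crossing (first is never bound: UnboundLocalError).
def Pre_get_zero_crossings (data : List Int) : Prop :=
  ∃ i ∈ PySem.List.pyRange 1 (data.length : Int) 1,
    PySem.List.pyGetD data i 0 > 0 ∧ PySem.List.pyGetD data (i - 1) 0 < 0
instance (data : List Int) : Decidable (Pre_get_zero_crossings data) := by
  unfold Pre_get_zero_crossings; infer_instance

def pvWitness_get_zero_crossings : List Int := [-1, 1]

def Spec_get_zero_crossings (data : List Int) (out : Int × Int) : Prop := out = get_zero_crossings_alt data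
instance (data : List Int) (out : Int × Int) : Decidable (Spec_get_zero_crossings data out) := by unfold Spec_get_zero_crossings; infer_instance

-- ===== CLAIM (what is proved, stated in full; the proofs are below) =====
def Claim_equal_get_zero_crossings : Prop := ∀ (data : List Int), Dom_get_zero_crossings data → Pre_get_zero_crossings data → Spec_get_zero_crossings data (get_zero_crossings data)

-- ===== LEMMAS AND PROOFS =====

lemma pv_first_eq (data : List Int) :
    ∀ (m : Nat) (k : Int), 1 ≤ k → (data.length : Int) - k ≤ m →
    pvA_first data (PySem.List.pyRange k (data.length : Int) 1) (PySem.List.pyGetD data (k - 1) 0) =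
      ((PySem.List.pyRange k (data.length : Int) 1).filter (pvB_p data)).head?.map
        (fun j => (j, PySem.List.pyGetD data (j - 1) 0)) := by
  intro m
  induction m with
  | zero =>
    intro k hk hm
    rw [PySem.List.pyRange_one_eq_nil (by omega)]
    simp [pvA_first]
  | succ m ih =>
    intro k hk hm
    by_cases h : (data.length : Int) ≤ k
    · rw [PySem.List.pyRange_one_eq_nil h]; simp [pvA_first]
    · rw [PySem.List.pyRange_one_cons (by omega)]
      simp only [pvA_first, List.filter_cons, pvB_p]
      by_cases hc : PySem.List.pyGetD data k 0 > 0 ∧ PySem.List.pyGetD data (k - 1) 0 < 0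
      · rw [if_pos hc]
        have : (decide (PySem.List.pyGetD data k 0 > 0) &&
            decide (PySem.List.pyGetD data (k - 1) 0 < 0)) = true := by
          simp [hc.1, hc.2]
        rw [if_pos this]
        simp
      · rw [if_neg hc]
        have : (decide (PySem.List.pyGetD data k 0 > 0) &&
            decide (PySem.List.pyGetD data (k - 1) 0 < 0)) = false := by
          rcases (Decidable.not_and_iff_or_not ..).mp hc with h1 | h1 <;> simp [h1]
        rw [if_neg (by simp [this])]
        have hrw : PySem.List.pyGetD data k 0 = PySem.List.pyGetD data (k + 1 - 1) 0 := by norm_num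
        rw [hrw]
        exact ih (k + 1) (by omega) (by omega)

lemma pv_second_eq (data : List Int) :
    ∀ (m : Nat) (k : Int) (last0 : Option Int), 1 ≤ k → (data.length : Int) - k ≤ m →
    pvA_second data (PySem.List.pyRange k (data.length : Int) 1) (PySem.List.pyGetD data (k - 1) 0) last0 =
      Option.or (((PySem.List.pyRange k (data.length : Int) 1).filter (pvB_p data)).getLast?) last0 := by
  intro m
  induction m with
  | zero =>
    intro k last0 hk hm
    rw [PySem.List.pyRange_one_eq_nil (by omega)]
    simp [pvA_second]
  | succ m ih =>
    intro k last0 hk hm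
    by_cases h : (data.length : Int) ≤ k
    · rw [PySem.List.pyRange_one_eq_nil h]; simp [pvA_second]
    · rw [PySem.List.pyRange_one_cons (by omega)]
      simp only [pvA_second, List.filter_cons, pvB_p]
      have hrw : PySem.List.pyGetD data k 0 = PySem.List.pyGetD data (k + 1 - 1) 0 := by norm_num
      by_cases hc : PySem.List.pyGetD data k 0 > 0 ∧ PySem.List.pyGetD data (k - 1) 0 < 0
      · rw [if_pos hc]
        have hb : (decide (PySem.List.pyGetD data k 0 > 0) &&
            decide (PySem.List.pyGetD data (k - 1) 0 < 0)) = true := by simp [hc.1, hc.2]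
        rw [if_pos hb, hrw, ih (k + 1) (some k) (by omega) (by omega)]
        cases hfe : ((PySem.List.pyRange (k + 1) (data.length : Int) 1).filter (pvB_p data)).getLast? with
        | none =>
          have : (PySem.List.pyRange (k + 1) (data.length : Int) 1).filter (pvB_p data) = [] :=
            List.getLast?_eq_none_iff.mp hfe
          simp [this, Option.or]
        | some x =>
          have hne : (PySem.List.pyRange (k + 1) (data.length : Int) 1).filter (pvB_p data) ≠ [] := by
            intro hnil; rw [hnil] at hfe; simp at hfe
          obtain ⟨b, t, hbt⟩ := List.exists_cons_of_ne_nil hne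
          rw [hbt] at hfe ⊢
          rw [List.getLast?_cons_cons, hfe]
          simp [Option.or]
      · rw [if_neg hc]
        have hb : (decide (PySem.List.pyGetD data k 0 > 0) &&
            decide (PySem.List.pyGetD data (k - 1) 0 < 0)) = false := by
          rcases (Decidable.not_and_iff_or_not ..).mp hc with h1 | h1 <;> simp [h1]
        rw [if_neg (by simp [hb]), hrw]
        exact ih (k + 1) last0 (by omega) (by omega)

-- ===== VERDICT (by name: the statement is the Claim_ definition above) =====
theorem get_zero_crossings_spec : Claim_equal_get_zero_crossings := by
  intro data _ hpre
  obtain ⟨i, hi, hgt, hlt⟩ := hpre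
  have hmem := (PySem.List.mem_pyRange_one).mp hi
  have hlen : (1 : Int) < (data.length : Int) := by omega
  have hpi : pvB_p data i = true := by simp [pvB_p, hgt, hlt]
  set xs := (PySem.List.pyRange 1 (data.length : Int) 1).filter (pvB_p data) with hxs
  clear_value xs
  have hxne : xs ≠ [] := by
    intro hnil
    have : i ∈ xs := by rw [hxs]; exact List.mem_filter.mpr ⟨hi, hpi⟩
    rw [hnil] at this; simp at this
  unfold Spec_get_zero_crossings get_zero_crossings get_zero_crossings_alt
  rw [PySem.List.pyRange_one_cons (by omega)]
  simp only [pvA_first, pvA_second]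
  have hc0 : ¬ (PySem.List.pyGetD data 0 0 > 0 ∧ PySem.List.pyGetD data 0 0 < 0) := by omega
  rw [if_neg hc0]
  have h00 : PySem.List.pyGetD data 0 0 = PySem.List.pyGetD data (1 - 1) 0 := by norm_num
  simp only [zero_add]
  rw [h00, pv_first_eq data (data.length) 1 (by omega) (by omega), ← hxs]
  cases hhd : xs.head? with
  | none => exact absurd (List.head?_eq_none_iff.mp hhd) hxne
  | some j =>
    simp only [Option.map_some]
    rw [pv_second_eq data (data.length) 1 _ (by omega) (by omega), ← hxs]
    cases hlast : xs.getLast? with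
    | none => exact absurd (List.getLast?_eq_none_iff.mp hlast) hxne
    | some L =>
      simp only [Option.or]
      rw [PySem.List.pyGetD_zero, PySem.List.pyGetD_neg_one xs 0 hxne]
      have h1 : xs.getD 0 0 = j := by
        cases xs with
        | nil => exact absurd rfl hxne
        | cons a t => simp at hhd; simp [hhd]
      have h2 : xs.getLast hxne = L := by
        rw [List.getLast?_eq_some_getLast hxne] at hlast
        exact Option.some.inj hlast
      rw [h1, h2]
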